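-- pv_equiv track=rewrite | github.com/YasmminClaudino/lab2018.2 | Extra/quadradoMagico.py | verificaColuna
-- ===== SOURCE A (Python) =====
-- def verificaSoma(soma,resultado):
--     if soma == resultado:
--         return resultado
--     else:
--         return -1
--
-- def verificaColuna(lista, tamanhoMatriz, resultado):
--     soma = 0
--     i = 0
--     j = 0
--     for todasColunas in range(tamanhoMatriz):
--         for linha in range(1):
--             for coluna in range(tamanhoMatriz):
--                 soma += lista[i][j]
--                 i+=1
--             if verificaSoma(soma, resultado) == resultado:
--                 j+=1
--                 i = 0
--                 soma = 0
--             else: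
--                 return -1
--     return resultado
-- ===== SOURCE B (Python) =====
-- def verificaColuna(lista, tamanhoMatriz, resultado):
--     somas = [0] * tamanhoMatriz
--     for row in lista[:tamanhoMatriz]:
--         somas = [s + x for s, x in zip(somas, row)]
--     return resultado if all(s == resultado for s in somas) else -1
-- ===== Notes on version B (the rewrite author's own statement) =====
-- stated objective: simpler
-- what changed: Replaces A's column-by-column rescans with index bookkeeping (three counters, a helper and an early return) by one row-major pass that folds each row into a vector of running column sums and one final all() check.
-- outside the precondition, e.g. on verificaColuna([[0, 0], [9]], 2, 0): A returns -1, B returns -1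
import Mathlib
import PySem

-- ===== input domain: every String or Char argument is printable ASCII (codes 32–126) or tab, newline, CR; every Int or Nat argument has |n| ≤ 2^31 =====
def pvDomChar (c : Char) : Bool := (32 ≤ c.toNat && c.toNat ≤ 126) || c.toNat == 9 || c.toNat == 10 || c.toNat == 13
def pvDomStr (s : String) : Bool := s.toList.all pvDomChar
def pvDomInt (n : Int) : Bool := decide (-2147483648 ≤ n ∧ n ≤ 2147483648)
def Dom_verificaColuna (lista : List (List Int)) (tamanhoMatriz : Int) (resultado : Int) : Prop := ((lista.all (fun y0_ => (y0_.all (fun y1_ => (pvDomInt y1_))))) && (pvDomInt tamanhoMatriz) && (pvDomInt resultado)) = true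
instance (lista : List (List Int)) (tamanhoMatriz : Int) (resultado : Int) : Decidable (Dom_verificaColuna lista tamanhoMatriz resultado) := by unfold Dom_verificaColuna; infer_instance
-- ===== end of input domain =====

-- B replaces A's column-by-column rescans with a single row-major pass that folds each
-- row into a vector of running column sums; same result, simpler decomposition (not faster).


-- ===== PORT A =====
def verificaSoma (soma resultado : Int) : Int :=
  if soma == resultado then resultado else -1

-- one iteration of A's innermost loop body: soma += lista[i][j]; i += 1
-- (lista[i][j] via pyGet?; the IndexError case, pyGet? = none, is excluded by Pre_, getD is never hit there)
def colSumA (lista : List (List Int)) (tn : Nat) (j : Int) : Int :=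
  (List.range tn).foldl
    (fun soma i => soma + ((PySem.List.pyGet? ((PySem.List.pyGet? lista (Int.ofNat i)).getD []) j).getD 0)) 0

-- A's outer loop over 'todasColunas' with early return -1; j/i/soma reset exactly as in A
def loopA (lista : List (List Int)) (tn : Nat) (resultado : Int) (j : Int) : Nat → Int
  | 0 => resultado
  | n + 1 =>
    let soma := colSumA lista tn j
    if verificaSoma soma resultado == resultado then
      loopA lista tn resultado (j + 1) n
    else
      -1

def verificaColuna (lista : List (List Int)) (tamanhoMatriz : Int) (resultado : Int) : Int :=
  loopA lista tamanhoMatriz.toNat resultado 0 tamanhoMatriz.toNat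

-- ===== PORT B =====
def verificaColuna_alt (lista : List (List Int)) (tamanhoMatriz : Int) (resultado : Int) : Int :=
  let somas :=
    (PySem.List.slice lista none (some tamanhoMatriz)).foldl
      (fun somas row => List.zipWith (fun s x => s + x) somas row)
      (List.replicate tamanhoMatriz.toNat 0)
  if somas.all (fun s => s == resultado) then resultado else -1

-- ===== PRECONDITION & SPEC =====
-- Pre_ restricts to well-formed tamanhoMatriz×tamanhoMatriz data: on ragged/undersized input A
-- raises IndexError mid-scan (except when its short-circuit returns -1 first, where B returns -1 too).
def Pre_verificaColuna (lista : List (List Int)) (tamanhoMatriz : Int) (resultado : Int) : Prop :=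
  0 < tamanhoMatriz →
    (tamanhoMatriz.toNat ≤ lista.length ∧
     ∀ row ∈ lista.take tamanhoMatriz.toNat, tamanhoMatriz ≤ (row.length : Int))
instance (lista : List (List Int)) (tamanhoMatriz : Int) (resultado : Int) : Decidable (Pre_verificaColuna lista tamanhoMatriz resultado) := by unfold Pre_verificaColuna; infer_instance

def pvWitness_verificaColuna : List (List Int) × Int × Int := ([[1, 1], [1, 1]], 2, 2)

def Spec_verificaColuna (lista : List (List Int)) (tamanhoMatriz : Int) (resultado : Int) (out : Int) : Prop := out = verificaColuna_alt lista tamanhoMatriz resultado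
instance (lista : List (List Int)) (tamanhoMatriz : Int) (resultado : Int) (out : Int) : Decidable (Spec_verificaColuna lista tamanhoMatriz resultado out) := by unfold Spec_verificaColuna; infer_instance

-- ===== CLAIM (what is proved, stated in full; the proofs are below) =====
def Claim_equal_verificaColuna : Prop := ∀ (lista : List (List Int)) (tamanhoMatriz : Int) (resultado : Int), Dom_verificaColuna lista tamanhoMatriz resultado → Pre_verificaColuna lista tamanhoMatriz resultado → Spec_verificaColuna lista tamanhoMatriz resultado (verificaColuna lista tamanhoMatriz resultado)

-- ===== LEMMAS AND PROOFS =====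


lemma loopA_char (lista : List (List Int)) (tn : Nat) (r : Int) :
    ∀ (n : Nat) (j : Int),
      loopA lista tn r j n =
        if ∀ k < n, colSumA lista tn (j + k) = r then r else -1 := by
  intro n
  induction n with
  | zero => intro j; simp [loopA]
  | succ n ih =>
    intro j
    by_cases h : colSumA lista tn j = r
    · have hcond : (∀ k < n + 1, colSumA lista tn (j + k) = r) ↔
          (∀ k < n, colSumA lista tn (j + 1 + k) = r) := by
        constructor
        · intro H k hk
          have := H (k + 1) (by omega)
          have e : j + ((k : Nat) + 1 : Nat) = j + 1 + k := by push_cast; ring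
          rwa [e] at this
        · intro H k hk
          match k with
          | 0 => simpa using h
          | k + 1 =>
            have := H k (by omega)
            have e : j + 1 + (k : Int) = j + ((k : Nat) + 1 : Nat) := by push_cast; ring
            rwa [e] at this
      simp only [loopA, verificaSoma, h]
      rw [ih (j + 1), if_congr hcond rfl rfl]
      simp
    · by_cases hr : r = -1
      · subst hr
        have hcb : verificaSoma (colSumA lista tn j) (-1) == (-1 : Int) := by
          simp [verificaSoma, h]
        simp only [loopA, hcb, if_true]
        rw [ih (j + 1)]
        split <;> split <;> rfl
      · have hcb : (verificaSoma (colSumA lista tn j) r == r) = false := by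
          simp [verificaSoma, h]
          intro hc; exact absurd hc.symm hr
        simp only [loopA, hcb, Bool.false_eq_true, if_false]
        rw [if_neg]
        intro H
        exact h (by simpa using H 0 (by omega))

lemma foldZip_char :
    ∀ (rows : List (List Int)) (s : List Int),
      (∀ row ∈ rows, s.length ≤ row.length) →
      (rows.foldl (fun somas row => List.zipWith (fun a b => a + b) somas row) s).length
          = s.length ∧
      ∀ j < s.length,
        (rows.foldl (fun somas row => List.zipWith (fun a b => a + b) somas row) s).getD j 0
          = s.getD j 0 + ((rows.map (fun row => row.getD j 0)).sum) := by
  intro rows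
  induction rows with
  | nil => intro s _; simp
  | cons row rows ih =>
    intro s h
    have hlen : s.length ≤ row.length := h row (by simp)
    have hz : (List.zipWith (fun a b : Int => a + b) s row).length = s.length := by
      simp; omega
    have hrec := ih (List.zipWith (fun a b => a + b) s row)
      (by intro r hr; rw [hz]; exact h r (by simp [hr]))
    refine ⟨by simpa [hz] using hrec.1, ?_⟩
    intro j hj
    have := hrec.2 j (by omega)
    simp only [List.foldl_cons] at *
    rw [this]
    rw [List.getD_eq_getElem _ _ (by rw [hz]; omega), List.getElem_zipWith,
        List.getD_eq_getElem _ _ hj]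
    simp only [List.map_cons, List.sum_cons]
    rw [List.getD_eq_getElem row 0 (by omega)]
    ring

lemma colSumA_eq_sum (lista : List (List Int)) (tn : Nat) (k : Nat)
    (hlen : tn <= lista.length) :
    colSumA lista tn (k : Int) = ((lista.take tn).map (fun row => row.getD k 0)).sum := by
  unfold colSumA
  induction tn with
  | zero => simp
  | succ n ih =>
    rw [List.range_succ, List.foldl_append, ih (by omega)]
    have : lista.take (n + 1) = lista.take n ++ [lista[n]] := by
      rw [List.take_add_one]
      simp [List.getElem?_eq_getElem (by omega : n < lista.length)]
    rw [this, List.map_append, List.sum_append]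
    simp [PySem.List.pyGet?_natCast, List.getElem?_eq_getElem (by omega : n < lista.length),
      List.getD_eq_getElem?_getD]
    rfl

lemma foldZip_nil :
    ∀ (rows : List (List Int)),
      rows.foldl (fun somas row => List.zipWith (fun a b : Int => a + b) somas row) [] = [] := by
  intro rows
  induction rows with
  | nil => rfl
  | cons row rows ih => simpa using ih

theorem verificaColuna_spec : Claim_equal_verificaColuna := by
  intro lista T r _ hpre
  unfold Spec_verificaColuna verificaColuna verificaColuna_alt
  by_cases hT : 0 < T
  · obtain ⟨hlen, hrows⟩ := hpre hT
    have hTnn : (0:Int) ≤ T := le_of_lt hT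
    set tn := T.toNat with htn
    have hslice : PySem.List.slice lista none (some T) = lista.take tn := by
      exact PySem.List.slice_to lista hTnn
    rw [hslice, loopA_char]
    have hshape : ∀ row ∈ lista.take tn, (List.replicate tn (0:Int)).length ≤ row.length := by
      intro row hr
      have := hrows row hr
      simp only [List.length_replicate]
      omega
    have hfz := foldZip_char (lista.take tn) (List.replicate tn 0) hshape
    set somas := (lista.take tn).foldl
        (fun somas row => List.zipWith (fun a b : Int => a + b) somas row)
        (List.replicate tn 0) with hsomas
    have hslen : somas.length = tn := by simpa using hfz.1
    have hget : ∀ j < tn, somas.getD j 0 = ((lista.take tn).map (fun row => row.getD j 0)).sum := by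
      intro j hj
      have := hfz.2 j (by simpa using hj)
      simpa using this
    have hiff : (∀ k < tn, colSumA lista tn ((0:Int) + k) = r) ↔
        (somas.all (fun s => s == r) = true) := by
      constructor
      · intro H
        rw [List.all_eq_true]
        intro x hx
        obtain ⟨j, hj, hxe⟩ := List.mem_iff_getElem.mp hx
        have hjtn : j < tn := by omega
        have := H j hjtn
        rw [zero_add, colSumA_eq_sum lista tn j hlen] at this
        simp only [beq_iff_eq]
        rw [← hxe]
        rw [← List.getD_eq_getElem _ _ hj]
        rw [hget j hjtn, this]
      · intro H k hk
        rw [zero_add, colSumA_eq_sum lista tn k hlen, ← hget k hk]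
        rw [List.all_eq_true] at H
        have : somas.getD k 0 ∈ somas := by
          rw [List.getD_eq_getElem _ _ (by omega)]
          exact List.getElem_mem _
        simpa using H _ this
    by_cases hall : somas.all (fun s => s == r) = true
    · rw [if_pos (hiff.mpr hall), if_pos hall]
    · rw [if_neg (fun H => hall (hiff.mp H)), if_neg hall]
  · have htn0 : T.toNat = 0 := by omega
    rw [htn0]
    simp [loopA, foldZip_nil]
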